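-- pv_equiv track=rewrite | github.com/airenas/punctuation | egs/bit-prepare2/local/fix_spaces.py | change_line
-- ===== SOURCE A (Python) =====
-- def change_line(line):
--     res = []
--     pr = ' '
--     pc = 0
--     for c in line:
--         if c == '{':
--             pc += 1
--         if c == '}':
--             pc -= 1
--         assert pc < 2, "Double {!"
--         assert pc >= 0, "Double }!"
--         if c == '{' and pr != ' ':
--             res.append(' ')
--         if pr == '}' and c != ' ':
--             res.append(' ')
--         if not (c == ' ' and pc > 0):
--             res.append(c)
--         pr = c
--     return ''.join(res)
-- ===== SOURCE B (Python) =====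
-- def change_line(line):
--     # validation pass: brace depth must stay within [0, 1]
--     depth = 0
--     for c in line:
--         if c == '{':
--             depth += 1
--         if c == '}':
--             depth -= 1
--         assert depth < 2, "Double {!"
--         assert depth >= 0, "Double }!"
--     # segment rewriting: copy text outside braces verbatim, strip spaces
--     # inside each brace group, add boundary spaces next to braces
--     out = []
--     rest = line
--     pr = ' '  # char of the original line immediately preceding rest
--     while True:
--         outside, brace, rest = rest.partition('{')
--         out.append(outside)
--         if not brace:
--             break
--         if (outside[-1] if outside else pr) != ' ':
--             out.append(' ')
--         out.append('{')
--         inner, close, rest = rest.partition('}')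
--         out.append(inner.replace(' ', ''))
--         out.append(close)
--         if close and rest and rest[0] != ' ':
--             out.append(' ')
--         pr = '}'
--     return ''.join(out)
-- ===== Notes on version B (the rewrite author's own statement) =====
-- stated objective: alternative
-- what changed: Replaced A's single char-by-char state machine (prev-char plus brace-depth counter deciding each emission) with a separate validation scan followed by segment rewriting: partition the string into outside-brace and inside-brace segments, strip spaces inside each brace group, and re-join while adding the boundary spaces next to the braces.
import Mathlib
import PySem

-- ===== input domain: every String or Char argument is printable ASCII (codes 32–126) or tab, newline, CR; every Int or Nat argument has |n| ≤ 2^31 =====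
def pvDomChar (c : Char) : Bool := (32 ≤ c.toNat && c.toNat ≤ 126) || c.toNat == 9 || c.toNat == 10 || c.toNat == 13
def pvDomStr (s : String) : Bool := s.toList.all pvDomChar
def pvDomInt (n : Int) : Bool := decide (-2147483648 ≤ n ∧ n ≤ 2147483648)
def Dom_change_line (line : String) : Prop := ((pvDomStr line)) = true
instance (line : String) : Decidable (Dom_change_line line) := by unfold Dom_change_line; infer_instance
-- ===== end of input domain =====

-- B rewrites the string by brace segments (partition/strip/join, a constant-factor win from
-- bulk string ops) instead of A's char-by-char state machine; same result on every input
-- where A's brace-nesting asserts pass (= Pre_).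

-- ===== PORT A =====
-- one step of A's for-loop; state = (res, pr, pc); the two asserts of A raise exactly
-- outside Pre_change_line and are therefore not modelled in this total port
def aStep : (List Char × Char × Int) → Char → (List Char × Char × Int)
  | (res, pr, pc), c =>
    let pc1 : Int := if c = '{' then pc + 1 else pc
    let pc2 : Int := if c = '}' then pc1 - 1 else pc1
    let r1 := if c = '{' ∧ pr ≠ ' ' then res ++ [' '] else res
    let r2 := if pr = '}' ∧ c ≠ ' ' then r1 ++ [' '] else r1
    let r3 := if ¬(c = ' ' ∧ pc2 > 0) then r2 ++ [c] else r2
    (r3, c, pc2)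

def change_line (line : String) : String :=
  String.mk (line.toList.foldl aStep ([], ' ', 0)).1

-- ===== PORT B =====
-- str.partition(sep) for a single-char sep: (before, found?, after); exact port of Source B's partition
def splitAtChar (sep : Char) : List Char → List Char × Bool × List Char
  | [] => ([], false, [])
  | x :: xs =>
    if x = sep then ([], true, xs)
    else
      let r := splitAtChar sep xs
      (x :: r.1, r.2.1, r.2.2)

-- termination helper for bLoop (cited by decreasing_by)
theorem splitAtChar_spec (sep : Char) (l : List Char) :
    sep ∉ (splitAtChar sep l).1 ∧
    (if (splitAtChar sep l).2.1 then l = (splitAtChar sep l).1 ++ sep :: (splitAtChar sep l).2.2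
     else (splitAtChar sep l).1 = l ∧ (splitAtChar sep l).2.2 = []) := by
  induction l with
  | nil => simp [splitAtChar]
  | cons x xs ih =>
    by_cases h : x = sep
    · simp [splitAtChar, h]
    · obtain ⟨ih1, ih2⟩ := ih
      simp only [splitAtChar, if_neg h]
      by_cases hf : (splitAtChar sep xs).2.1
      · rw [hf] at ih2 ⊢
        simp only [if_true] at ih2 ⊢
        refine ⟨?_, by rw [List.cons_append, ← ih2]⟩
        simp only [List.mem_cons, not_or]
        exact ⟨fun hs => h hs.symm, ih1⟩
      · simp only [Bool.not_eq_true] at hf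
        rw [hf] at ih2 ⊢
        simp only [Bool.false_eq_true, if_false] at ih2 ⊢
        refine ⟨?_, by rw [ih2.1], ih2.2⟩
        simp only [List.mem_cons, not_or]
        exact ⟨fun hs => h hs.symm, ih1⟩

theorem bLoop_dec (rest : List Char) (hb : (splitAtChar '{' rest).2.1 = true) :
    (splitAtChar '}' (splitAtChar '{' rest).2.2).2.2.length < rest.length := by
  have h1 := (splitAtChar_spec '{' rest).2
  rw [hb] at h1; simp only [if_true] at h1
  have hlen1 : (splitAtChar '{' rest).2.2.length < rest.length := by
    have := congrArg List.length h1
    simp at this; omega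
  have h2 := (splitAtChar_spec '}' (splitAtChar '{' rest).2.2).2
  by_cases hc : (splitAtChar '}' (splitAtChar '{' rest).2.2).2.1
  · rw [hc] at h2; simp only [if_true] at h2
    have := congrArg List.length h2
    simp at this; omega
  · simp only [Bool.not_eq_true] at hc
    rw [hc] at h2
    simp only [Bool.false_eq_true, if_false] at h2
    rw [h2.2]
    have hpos : 0 < rest.length := by
      have := congrArg List.length h1
      simp at this; omega
    simpa using hpos

-- port of Source B's while loop: partition at '{', rewrite one brace group, recurse on the tail;
-- Source B's inner.replace(' ', '') is ported as a filter (exact for a one-char pattern and empty replacement)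
def bLoop (pr : Char) (rest : List Char) : List Char :=
  let o := splitAtChar '{' rest
  if hb : o.2.1 = true then
    let i := splitAtChar '}' o.2.2
    o.1 ++ (if o.1.getLastD pr ≠ ' ' then [' '] else []) ++ '{' ::
      (i.1.filter (fun c => c ≠ ' ') ++
       ((if i.2.1 then ['}'] else []) ++
        ((if i.2.1 ∧ i.2.2 ≠ [] ∧ i.2.2.headD ' ' ≠ ' ' then [' '] else []) ++
         bLoop '}' i.2.2)))
  else o.1
termination_by rest.length
decreasing_by exact bLoop_dec rest hb

-- Source B's validation for-loop only raises (outside Pre_) and computes nothing on Pre_ inputs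
def change_line_alt (line : String) : String :=
  String.mk (bLoop ' ' line.toList)

-- ===== PRECONDITION & SPEC =====
-- exactly the inputs where A's asserts pass: every prefix's brace balance stays within [0, 1]
def Pre_change_line (line : String) : Prop :=
  ∀ p ∈ line.toList.inits, p.count '}' ≤ p.count '{' ∧ p.count '{' ≤ p.count '}' + 1

instance (line : String) : Decidable (Pre_change_line line) := by
  unfold Pre_change_line; infer_instance

def pvWitness_change_line : String := "a {b c} d"

def Spec_change_line (line : String) (out : String) : Prop := out = change_line_alt line
instance (line : String) (out : String) : Decidable (Spec_change_line line out) := by unfold Spec_change_line; infer_instance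

-- ===== CLAIM (what is proved, stated in full; the proofs are below) =====
def Claim_equal_change_line : Prop := ∀ (line : String), Dom_change_line line → Pre_change_line line → Spec_change_line line (change_line line)

-- ===== LEMMAS AND PROOFS =====

-- running-depth formulation of validity, used only by the proofs
def validFrom : Int → List Char → Bool
  | _, [] => true
  | d, c :: cs =>
    let d' := d + (if c = '{' then 1 else 0) - (if c = '}' then 1 else 0)
    (decide (d' < 2) && decide (0 ≤ d')) && validFrom d' cs

theorem counts_valid (l : List Char) (d : Int) (hd0 : 0 ≤ d) (hd1 : d ≤ 1)
    (h : ∀ p ∈ l.inits, 0 ≤ d + (p.count '{' : Int) - p.count '}' ∧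
         d + (p.count '{' : Int) - p.count '}' ≤ 1) :
    validFrom d l = true := by
  induction l generalizing d with
  | nil => simp [validFrom]
  | cons c cs ih =>
    have hc := h [c] (by simp [List.inits_cons])
    simp only [List.count_cons, List.count_nil] at hc
    simp only [validFrom, Bool.and_eq_true, decide_eq_true_eq]
    have hb : 0 ≤ d + (if c = '{' then (1:Int) else 0) - (if c = '}' then 1 else 0) ∧
        d + (if c = '{' then (1:Int) else 0) - (if c = '}' then 1 else 0) ≤ 1 := by
      obtain ⟨hc1, hc2⟩ := hc
      by_cases e1 : c = '{'
      · have e2 : ¬ c = '}' := by simp [e1]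
        simp [e1, e2] at hc1 hc2 ⊢ <;> omega
      · by_cases e2 : c = '}' <;>
          · simp [e1, e2] at hc1 hc2 ⊢ <;> omega
    refine ⟨⟨by omega, hb.1⟩, ih _ hb.1 hb.2 ?_⟩
    intro p hp
    have hcp := h (c :: p) (by rw [List.inits_cons]; exact List.mem_cons_of_mem _ (List.mem_map_of_mem hp))
    simp only [List.count_cons] at hcp
    obtain ⟨hp1, hp2⟩ := hcp
    by_cases e1 : c = '{'
    · have e2 : ¬ c = '}' := by simp [e1]
      simp [e1, e2] at hp1 hp2 ⊢ <;> push_cast at hp1 hp2 ⊢ <;> omega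
    · by_cases e2 : c = '}' <;>
        · simp [e1, e2] at hp1 hp2 ⊢ <;> push_cast at hp1 hp2 ⊢ <;> omega

theorem pre_valid (line : String) (h : Pre_change_line line) : validFrom 0 line.toList = true := by
  apply counts_valid _ 0 le_rfl (by norm_num)
  intro p hp
  have := h p hp
  push_cast
  omega

-- the space A inserts after a closing '}' when the NEXT char is not a space
def spAfter (pr : Char) (l : List Char) : List Char :=
  if pr = '}' ∧ l ≠ [] ∧ l.headD ' ' ≠ ' ' then [' '] else []

theorem A_out (o : List Char) (ho1 : '{' ∉ o) (ho2 : '}' ∉ o) (res : List Char) (pr : Char) :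
    o.foldl aStep (res, pr, 0) = (res ++ spAfter pr o ++ o, o.getLastD pr, 0) := by
  induction o generalizing res pr with
  | nil => simp [spAfter]
  | cons c cs ih =>
    simp only [List.mem_cons, not_or] at ho1 ho2
    have hc1 : ¬ c = '{' := Ne.symm ho1.1
    have hc2 : ¬ c = '}' := Ne.symm ho2.1
    rw [List.foldl_cons]
    have hstep : aStep (res, pr, 0) c =
        (res ++ (if pr = '}' ∧ ¬ c = ' ' then [' '] else []) ++ [c], c, 0) := by
      simp [aStep, hc1, hc2]
      split_ifs <;> simp
    rw [hstep, ih ho1.2 ho2.2]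
    have hsp : spAfter c cs = [] := by simp [spAfter, hc2]
    rw [hsp]
    simp only [spAfter, List.getLastD_cons, List.append_nil]
    split_ifs <;> simp_all

theorem A_inner (i : List Char) (h1 : '{' ∉ i) (h2 : '}' ∉ i) (res : List Char) (pr : Char)
    (hpr : pr ≠ '}') :
    i.foldl aStep (res, pr, 1) = (res ++ i.filter (fun c => c ≠ ' '), i.getLastD pr, 1) := by
  induction i generalizing res pr with
  | nil => simp
  | cons c cs ih =>
    simp only [List.mem_cons, not_or] at h1 h2
    have hc1 : ¬ c = '{' := Ne.symm h1.1
    have hc2 : ¬ c = '}' := Ne.symm h2.1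
    rw [List.foldl_cons]
    have hstep : aStep (res, pr, 1) c =
        (res ++ (if c = ' ' then [] else [c]), c, 1) := by
      simp [aStep, hc1, hc2, hpr]
      split_ifs <;> simp_all
    rw [hstep, ih h1.2 h2.2 _ c hc2]
    simp only [List.filter_cons, List.getLastD_cons]
    split_ifs <;> simp_all

theorem valid0_seg (o t : List Char) (h : validFrom 0 (o ++ t) = true) (ho : '{' ∉ o) :
    '}' ∉ o ∧ validFrom 0 t = true := by
  induction o with
  | nil => simpa using h
  | cons c cs ih =>
    simp only [List.mem_cons, not_or] at ho
    have hc1 : ¬ c = '{' := Ne.symm ho.1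
    simp only [List.cons_append, validFrom, hc1, if_false, Bool.and_eq_true,
      decide_eq_true_eq] at h
    have hc2 : ¬ c = '}' := by
      intro e
      rcases h with ⟨⟨_, h0⟩, _⟩
      simp [e] at h0
    simp only [hc2, if_false] at h
    have := ih (by simpa using h.2) ho.2
    simp only [List.mem_cons, not_or]
    exact ⟨⟨Ne.symm hc2, this.1⟩, this.2⟩

theorem valid1_seg (i t : List Char) (h : validFrom 1 (i ++ t) = true) (hi : '}' ∉ i) :
    '{' ∉ i ∧ validFrom 1 t = true := by
  induction i with
  | nil => simpa using h
  | cons c cs ih =>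
    simp only [List.mem_cons, not_or] at hi
    have hc2 : ¬ c = '}' := Ne.symm hi.1
    simp only [List.cons_append, validFrom, hc2, if_false, Bool.and_eq_true,
      decide_eq_true_eq] at h
    have hc1 : ¬ c = '{' := by
      intro e
      rcases h with ⟨⟨h0, _⟩, _⟩
      simp [e] at h0
    simp only [hc1, if_false] at h
    have := ih (by simpa using h.2) hi.2
    simp only [List.mem_cons, not_or]
    exact ⟨⟨Ne.symm hc1, this.1⟩, this.2⟩

theorem spAfter_append (pr : Char) (o t : List Char) (ho : o ≠ []) :
    spAfter pr (o ++ t) = spAfter pr o := by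
  cases o with
  | nil => exact absurd rfl ho
  | cons c cs => simp [spAfter]

theorem getLastD_ne (l : List Char) (d c : Char) (hd : d ≠ c) (hl : c ∉ l) :
    l.getLastD d ≠ c := by
  intro e
  have hm : l.getLastD d ∈ d :: l := List.getLastD_mem_cons
  rw [e] at hm
  rcases List.mem_cons.mp hm with h | h
  · exact hd h.symm
  · exact hl h

-- for a nonempty list the default never surfaces
theorem getLastD_ne' (c : Char) (cs : List Char) (d x : Char) (h : x ∉ c :: cs) :
    (c :: cs).getLastD d ≠ x := by
  induction cs generalizing c d with
  | nil => simpa using fun e => h (by simp [e])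
  | cons a as ih =>
    rw [List.getLastD_cons]
    exact ih a c (by simp only [List.mem_cons, not_or] at h ⊢; exact ⟨h.2.1, h.2.2⟩)

theorem valid_openStep (r : List Char) (h : validFrom 0 ('{' :: r) = true) :
    validFrom 1 r = true := by
  simpa [validFrom] using h

theorem valid_closeStep (r : List Char) (h : validFrom 1 ('}' :: r) = true) :
    validFrom 0 r = true := by
  simpa [validFrom] using h

theorem aStep_open (R : List Char) (pr' : Char) :
    aStep (R, pr', 0) '{' =
      (R ++ (if pr' ≠ ' ' then [' '] else []) ++ (if pr' = '}' then [' '] else []) ++ ['{'], '{', 1) := by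
  simp [aStep]
  split_ifs <;> simp_all

theorem aStep_close (R : List Char) (pr' : Char) (hpr : pr' ≠ '}') :
    aStep (R, pr', 1) '}' = (R ++ ['}'], '}', 0) := by
  simp [aStep, hpr]

theorem aFold_eq_bLoop (rest : List Char) (h : validFrom 0 rest = true) (res : List Char) (pr : Char) :
    (rest.foldl aStep (res, pr, 0)).1 = res ++ spAfter pr rest ++ bLoop pr rest := by
  have hspec := splitAtChar_spec '{' rest
  rcases hsp1 : splitAtChar '{' rest with ⟨o, b1, r1⟩
  rw [hsp1] at hspec
  obtain ⟨hno, hdec⟩ := hspec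
  by_cases hb : b1 = true
  case neg =>
    rw [Bool.not_eq_true] at hb
    rw [hb] at hdec
    simp only [Bool.false_eq_true, if_false] at hdec
    obtain ⟨ho, -⟩ := hdec
    rw [ho] at hno
    have hc := valid0_seg rest [] (by simpa using h) hno
    rw [A_out rest hno hc.1 res pr]
    have hbl : bLoop pr rest = rest := by
      rw [bLoop, hsp1]
      simp [hb, ho]
    rw [hbl]
  case pos =>
    rw [hb] at hdec
    simp only [if_true] at hdec
    have hv := valid0_seg o ('{' :: r1) (by rw [← hdec]; exact h) hno
    have hv1 : validFrom 1 r1 = true := valid_openStep r1 hv.2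
    have hspec2 := splitAtChar_spec '}' r1
    rcases hsp2 : splitAtChar '}' r1 with ⟨i, b2, r2⟩
    rw [hsp2] at hspec2
    obtain ⟨hni, hdec2⟩ := hspec2
    -- unfold one step of bLoop
    have hbl : bLoop pr rest = o ++ (if o.getLastD pr ≠ ' ' then [' '] else []) ++ '{' ::
        (i.filter (fun c => c ≠ ' ') ++
         ((if b2 then ['}'] else []) ++
          ((if b2 ∧ r2 ≠ [] ∧ r2.headD ' ' ≠ ' ' then [' '] else []) ++ bLoop '}' r2))) := by
      rw [bLoop, hsp1]
      simp only [hb, dite_true, hsp2]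
    -- fold the A side over o and the '{'
    conv_lhs => rw [hdec]
    rw [List.foldl_append, List.foldl_cons, A_out o hno hv.1 res pr, aStep_open]
    by_cases hb2 : b2 = true
    case pos =>
      rw [hb2] at hdec2
      simp only [if_true] at hdec2
      have hvi := valid1_seg i ('}' :: r2) (by rw [← hdec2]; exact hv1) hni
      have hv0 : validFrom 0 r2 = true := valid_closeStep r2 (hvi.2)
      have hpr3 : (i.getLastD '{') ≠ '}' := getLastD_ne i '{' '}' (by decide) hni
      conv_lhs => rw [hdec2]
      rw [List.foldl_append, A_inner i hvi.1 hni _ '{' (by decide),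
        List.foldl_cons, aStep_close _ _ hpr3]
      have hlt : r2.length < rest.length := by
        have e1 := congrArg List.length hdec
        have e2 := congrArg List.length hdec2
        simp at e1 e2
        omega
      rw [aFold_eq_bLoop r2 hv0 _ '}']
      rw [hbl, hb2]
      simp only [if_true]
      rw [hdec]
      rcases o with _ | ⟨c, cs⟩
      · simp only [List.nil_append, List.getLastD_nil]
        by_cases e1 : pr = '}'
        · have e2 : pr ≠ ' ' := by rw [e1]; decide
          simp [e1, e2, spAfter]
        · by_cases e2 : pr = ' ' <;> simp [e1, e2, spAfter]
      · rw [spAfter_append pr (c :: cs) _ (by simp),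
          if_neg (getLastD_ne' c cs pr '}' hv.1)]
        simp [spAfter]
    case neg =>
      rw [Bool.not_eq_true] at hb2
      rw [hb2] at hdec2
      simp only [Bool.false_eq_true, if_false] at hdec2
      obtain ⟨hir, hr2⟩ := hdec2
      rw [hir] at hni
      have hvi := valid1_seg r1 [] (by simpa using hv1) hni
      rw [A_inner r1 hvi.1 hni _ '{' (by decide)]
      have hblnil : bLoop '}' r2 = [] := by
        rw [hr2, bLoop]
        simp [splitAtChar]
      rw [hbl, hb2, hblnil, hir]
      simp only [Bool.false_eq_true, if_false, false_and, List.append_nil]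
      rw [hdec]
      rcases o with _ | ⟨c, cs⟩
      · simp only [List.nil_append, List.getLastD_nil]
        by_cases e1 : pr = '}'
        · have e2 : pr ≠ ' ' := by rw [e1]; decide
          simp [e1, e2, spAfter]
        · by_cases e2 : pr = ' ' <;> simp [e1, e2, spAfter]
      · rw [spAfter_append pr (c :: cs) _ (by simp),
          if_neg (getLastD_ne' c cs pr '}' hv.1)]
        simp [spAfter]
  termination_by rest.length
  decreasing_by exact hlt

-- ===== VERDICT (by name: the statement is the Claim_ definition above) =====
theorem change_line_spec : Claim_equal_change_line := by
  intro line _ hpre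
  unfold Spec_change_line change_line change_line_alt
  have h := aFold_eq_bLoop line.toList (pre_valid line hpre) [] ' '
  simp [spAfter] at h
  rw [h]
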